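-- pv_equiv track=rewrite | github.com/DA-testa/parallel-processing-PatriksJasinovics | main.py | parallel_processing
-- ===== SOURCE A (Python) =====
-- def parallel_processing(n, m, data):
--     output = [] #output
--     time = [0] * n #finish time
--     # function for simulating parallel tasks,
--     # create the output pairs
--
--     for x in range(m):
--         thread = 0
--         for z in range(1, n):
--             if time[z] < time[thread]:
--                 thread = z
--         output.append((thread, time[thread]))
--         time[thread] += data[x]
--
--     return output
-- ===== SOURCE B (Python) =====
-- def parallel_processing(n, m, data):
--     # Keep the idle pool as a list of (finish_time, thread) pairs sorted
--     # ascending; the head is always the next thread to run a job.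
--     output = []
--     pool = [(0, i) for i in range(n)]
--     for x in range(m):
--         t, i = pool[0]
--         output.append((i, t))
--         rest = pool[1:]
--         item = (t + data[x], i)
--         k = 0
--         while k < len(rest) and rest[k] < item:
--             k += 1
--         pool = rest[:k] + [item] + rest[k:]
--     return output
-- ===== Notes on version B (the rewrite author's own statement) =====
-- stated objective: alternative
-- what changed: B keeps the threads as a pool of (finish_time, thread) pairs maintained in ascending sorted order, popping the head and re-inserting the updated pair at its sorted position, instead of A's per-job linear argmin scan over a time array.
import Mathlib
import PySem

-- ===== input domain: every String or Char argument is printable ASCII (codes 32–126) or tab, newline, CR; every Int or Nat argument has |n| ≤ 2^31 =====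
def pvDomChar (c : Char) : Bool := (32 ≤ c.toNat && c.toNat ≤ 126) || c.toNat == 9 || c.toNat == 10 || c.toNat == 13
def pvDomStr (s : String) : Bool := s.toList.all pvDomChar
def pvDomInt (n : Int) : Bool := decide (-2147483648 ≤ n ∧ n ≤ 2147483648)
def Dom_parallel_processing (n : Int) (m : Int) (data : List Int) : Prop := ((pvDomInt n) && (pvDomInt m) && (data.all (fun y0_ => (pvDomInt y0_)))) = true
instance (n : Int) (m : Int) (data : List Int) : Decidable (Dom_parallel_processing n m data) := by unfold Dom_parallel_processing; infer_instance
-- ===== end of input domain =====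

-- B replaces A's per-job argmin scan over a time array by a pool of (finish_time, thread)
-- pairs kept in ascending sorted order (pop head, re-insert at sorted position); same cost class.

-- ===== PORT A =====
-- A's inner loop: 'thread = 0; for z in range(1, n): if time[z] < time[thread]: thread = z'
def ppArgmin (n : Int) (time : List Int) : Int :=
  (PySem.List.pyRange 1 n 1).foldl
    (fun thread z =>
      if PySem.List.pyGetD time z 0 < PySem.List.pyGetD time thread 0 then z else thread) 0

-- A's loop body: append (thread, time[thread]) and do time[thread] += data[x]
def ppStepA (n : Int) (data : List Int) (st : List (Int × Int) × List Int) (x : Int) :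
    List (Int × Int) × List Int :=
  let thread := ppArgmin n st.2
  (st.1 ++ [(thread, PySem.List.pyGetD st.2 thread 0)],
   PySem.List.pySetD st.2 thread
     (PySem.List.pyGetD st.2 thread 0 + PySem.List.pyGetD data x 0))

def parallel_processing (n : Int) (m : Int) (data : List Int) : List (Int × Int) :=
  ((PySem.List.pyRange 0 m 1).foldl (ppStepA n data) ([], List.replicate n.toNat 0)).1

-- ===== PORT B =====
-- Python tuple comparison (t, i) < (t', i') : lexicographic
def ppLt (a b : Int × Int) : Bool := a.1 < b.1 || (a.1 == b.1 && a.2 < b.2)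

-- the 'k = 0; while k < len(rest) and rest[k] < item: k += 1' scan (k is the accumulator)
def ppPosAux (item : Int × Int) (k : Nat) : List (Int × Int) → Nat
  | [] => k
  | p :: ps => if ppLt p item then ppPosAux item (k + 1) ps else k

def ppPos (item : Int × Int) (l : List (Int × Int)) : Nat := ppPosAux item 0 l

-- B's loop body: pop pool[0], append (i, t), re-insert (t + data[x], i) at its sorted slot
def ppStepB (data : List Int) (st : List (Int × Int) × List (Int × Int)) (x : Int) :
    List (Int × Int) × List (Int × Int) :=
  match st.2 with
  | [] => st   -- Python raises IndexError on pool[0] here; excluded by Pre_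
  | (t, i) :: rest =>
    let item := (t + PySem.List.pyGetD data x 0, i)
    let k := ppPos item rest
    (st.1 ++ [(i, t)], rest.take k ++ item :: rest.drop k)

def parallel_processing_alt (n : Int) (m : Int) (data : List Int) : List (Int × Int) :=
  ((PySem.List.pyRange 0 m 1).foldl (ppStepB data)
    ([], (PySem.List.pyRange 0 n 1).map (fun i => ((0 : Int), i)))).1

-- ===== PRECONDITION & SPEC =====
-- Pre_ excludes exactly the inputs where the Python A raises IndexError:
-- a positive job count with no thread (n ≤ 0) or with fewer than m data entries.
def Pre_parallel_processing (n : Int) (m : Int) (data : List Int) : Prop :=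
  0 < m → (1 ≤ n ∧ m ≤ (data.length : Int))
instance (n : Int) (m : Int) (data : List Int) : Decidable (Pre_parallel_processing n m data) := by
  unfold Pre_parallel_processing; infer_instance

def pvWitness_parallel_processing : Int × Int × List Int := (2, 3, [4, 1, 2])

def Spec_parallel_processing (n : Int) (m : Int) (data : List Int) (out : List (Int × Int)) : Prop := out = parallel_processing_alt n m data
instance (n : Int) (m : Int) (data : List Int) (out : List (Int × Int)) : Decidable (Spec_parallel_processing n m data out) := by unfold Spec_parallel_processing; infer_instance

-- ===== CLAIM (what is proved, stated in full; the proofs are below) =====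
def Claim_equal_parallel_processing : Prop := ∀ (n : Int) (m : Int) (data : List Int), Dom_parallel_processing n m data → Pre_parallel_processing n m data → Spec_parallel_processing n m data (parallel_processing n m data)

-- ===== LEMMAS AND PROOFS =====

-- the list of (time[k], k) pairs, in index order (the multiset B's pool maintains sorted)
def ppPairs (time : List Int) : List (Int × Int) :=
  (PySem.List.enumerate time 0).map (fun p => (p.2, p.1))

lemma ppLt_trans {a b c : Int × Int} (h1 : ppLt a b = true) (h2 : ppLt b c = true) :
    ppLt a c = true := by
  simp only [ppLt, Bool.or_eq_true, decide_eq_true_eq, Bool.and_eq_true, beq_iff_eq] at *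
  omega

lemma ppLt_total {a b : Int × Int} (h : a.2 ≠ b.2) (h2 : ppLt a b = false) : ppLt b a = true := by
  simp only [ppLt, Bool.or_eq_false_iff, Bool.or_eq_true, decide_eq_true_eq,
    decide_eq_false_iff_not, Bool.and_eq_false_iff, Bool.and_eq_true, beq_iff_eq,
    beq_eq_false_iff_ne, ne_eq] at *
  omega

lemma ppPosAux_shift (item : Int × Int) (l : List (Int × Int)) :
    ∀ k : Nat, ppPosAux item k l = k + ppPosAux item 0 l := by
  induction l with
  | nil => intro k; simp [ppPosAux]
  | cons p ps ih =>
    intro k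
    simp only [ppPosAux]
    split
    · rw [ih (k + 1), ih 1]; omega
    · omega

lemma ppPos_cons (item q : Int × Int) (qs : List (Int × Int)) :
    ppPos item (q :: qs) = if ppLt q item then ppPos item qs + 1 else 0 := by
  simp only [ppPos, ppPosAux]
  split
  · rw [ppPosAux_shift]; omega
  · rfl

lemma ppPairs_length (time : List Int) : (ppPairs time).length = time.length := by
  simp [ppPairs, PySem.List.length_enumerate]

lemma ppPairs_getElem (time : List Int) (k : Nat) (h : k < time.length) :
    (ppPairs time)[k]'(by simpa [ppPairs_length] using h) = (time[k], (k : Int)) := by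
  simp [ppPairs, PySem.List.getElem_enumerate]

lemma mem_ppPairs {time : List Int} {p : Int × Int} (h : p ∈ ppPairs time) :
    ∃ k : Nat, ∃ hk : k < time.length, p = (time[k], (k : Int)) := by
  simp only [ppPairs, List.mem_map] at h
  obtain ⟨q, hq, rfl⟩ := h
  rw [PySem.List.mem_enumerate_iff] at hq
  obtain ⟨k, hk, rfl⟩ := hq
  exact ⟨k, hk, by simp⟩

lemma ppPairs_snd (time : List Int) :
    (ppPairs time).map (·.2) = PySem.List.pyRange 0 time.length 1 := by
  have := PySem.List.map_fst_enumerate time (0 : Int)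
  simp only [ppPairs, List.map_map]
  simpa using this

lemma ppPairs_set (time : List Int) (j : Nat) (_h : j < time.length) (v : Int) :
    ppPairs (time.set j v) = (ppPairs time).set j (v, (j : Int)) := by
  apply List.ext_getElem
  · simp [ppPairs_length]
  · intro k h1 h2
    have hk : k < time.length := by simpa [ppPairs_length] using h2
    rw [List.getElem_set]
    have h1' : k < (time.set j v).length := by simpa using hk
    rw [ppPairs_getElem _ _ (by simpa using hk)]
    by_cases hjk : j = k
    · subst hjk; simp [List.getElem_set_self]
    · rw [List.getElem_set_ne hjk]
      simp [hjk, ppPairs_getElem _ _ hk]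

lemma ppPos_take (item : Int × Int) (l : List (Int × Int)) :
    ∀ p ∈ l.take (ppPos item l), ppLt p item = true := by
  induction l with
  | nil => simp
  | cons q qs ih =>
    rw [ppPos_cons]
    split
    · rename_i hq
      intro p hp
      rw [List.take_succ_cons] at hp
      rcases List.mem_cons.mp hp with rfl | hp
      · exact hq
      · exact ih p hp
    · simp

lemma ppPos_drop (item : Int × Int) (l : List (Int × Int))
    (hs : l.Pairwise (fun a b => ppLt a b = true)) :
    ∀ p ∈ l.drop (ppPos item l), ppLt p item = false := by
  induction l with
  | nil => simp
  | cons q qs ih =>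
    rw [List.pairwise_cons] at hs
    rw [ppPos_cons]
    split
    · rename_i hq
      intro p hp
      rw [List.drop_succ_cons] at hp
      exact ih hs.2 p hp
    · rename_i hq
      intro p hp
      rw [List.drop_zero] at hp
      rcases List.mem_cons.mp hp with rfl | hp
      · exact Bool.eq_false_iff.mpr (by simpa using hq)
      · cases hpl : ppLt p item
        · rfl
        · exact absurd (ppLt_trans (hs.1 p hp) hpl) (by simpa using hq)

-- A's inner scan, as a function of the scanned index list (definitionally ppArgmin's fold)
def ppScan (time : List Int) (acc : Int) (l : List Int) : Int :=
  l.foldl (fun thread z =>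
    if PySem.List.pyGetD time z 0 < PySem.List.pyGetD time thread 0 then z else thread) acc

-- A's inner scan finds the first index of the minimum of time[z] over {acc} ∪ [a, a+k)
lemma ppArgmin_inv (time : List Int) (a acc : Int) (hacc : 0 ≤ acc) (hlt : acc < a) :
    ∀ k : Nat, ∃ r, ppScan time acc (PySem.List.pyRange a (a + (k : Int)) 1) = r ∧
      (r = acc ∨ (a ≤ r ∧ r < a + (k : Int))) ∧
      ∀ z : Int, (z = acc ∨ (a ≤ z ∧ z < a + (k : Int))) →
        PySem.List.pyGetD time r 0 ≤ PySem.List.pyGetD time z 0 ∧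
        (z < r → PySem.List.pyGetD time r 0 < PySem.List.pyGetD time z 0) := by
  intro k
  induction k with
  | zero =>
    refine ⟨acc, ?_, Or.inl rfl, ?_⟩
    · simp [ppScan]
    · intro z hz
      have : z = acc := by omega
      subst this
      exact ⟨le_refl _, by omega⟩
  | succ k ih =>
    obtain ⟨r, hr, hmem, hmin⟩ := ih
    have hsplit : PySem.List.pyRange a (a + ((k+1 : Nat) : Int)) 1
        = PySem.List.pyRange a (a + (k : Int)) 1 ++ [a + (k : Int)] := by
      have : a + ((k+1 : Nat) : Int) = (a + (k : Int)) + 1 := by push_cast; ring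
      rw [this, PySem.List.pyRange_one_succ_right (by omega)]
    rw [hsplit]
    unfold ppScan
    rw [List.foldl_append]
    simp only [List.foldl_cons, List.foldl_nil]
    rw [show (PySem.List.pyRange a (a + (k : Int)) 1).foldl
        (fun thread z => if PySem.List.pyGetD time z 0 < PySem.List.pyGetD time thread 0 then z else thread) acc = r from hr]
    by_cases hc : PySem.List.pyGetD time (a + (k : Int)) 0 < PySem.List.pyGetD time r 0
    · refine ⟨a + (k : Int), by simp [hc], Or.inr ⟨by omega, by omega⟩, ?_⟩
      intro z hz
      rcases hz with rfl | hz
      · have := (hmin z (Or.inl rfl)).1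
        exact ⟨by omega, fun _ => by omega⟩
      · by_cases hzk : z < a + (k : Int)
        · have := (hmin z (Or.inr ⟨hz.1, hzk⟩)).1
          exact ⟨by omega, fun _ => by omega⟩
        · have : z = a + (k : Int) := by omega
          subst this
          exact ⟨le_refl _, by omega⟩
    · refine ⟨r, by simp [hc], ?_, ?_⟩
      · rcases hmem with h | h
        · exact Or.inl h
        · exact Or.inr ⟨h.1, by omega⟩
      · intro z hz
        rcases hz with rfl | hz
        · exact hmin z (Or.inl rfl)
        · by_cases hzk : z < a + (k : Int)
          · exact hmin z (Or.inr ⟨hz.1, hzk⟩)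
          · have : z = a + (k : Int) := by omega
            subst this
            have hzr : ¬ (a + (k : Int) < r) := by
              rcases hmem with h | h <;> omega
            exact ⟨by omega, fun h => absurd h hzr⟩

-- specialisation to A's inner loop (acc = 0, range 1..n)
lemma ppArgmin_spec (n : Int) (time : List Int) (hn : 1 ≤ n) :
    ∃ r : Int, ppArgmin n time = r ∧ 0 ≤ r ∧ r < n ∧
      ∀ z : Int, 0 ≤ z → z < n →
        PySem.List.pyGetD time r 0 ≤ PySem.List.pyGetD time z 0 ∧
        (z < r → PySem.List.pyGetD time r 0 < PySem.List.pyGetD time z 0) := by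
  obtain ⟨r, hr, hmem, hmin⟩ := ppArgmin_inv time 1 0 (le_refl 0) (by omega) (n - 1).toNat
  have hcast : (1 : Int) + (((n - 1).toNat : Nat) : Int) = n := by omega
  rw [hcast] at hr hmem hmin
  refine ⟨r, hr, by omega, by omega, ?_⟩
  intro z h0 hzn
  exact hmin z (by omega)

-- the main loop invariant: pool is the (time[k], k) multiset, sorted; outputs stay equal
lemma pp_loop (n : Int) (hn : 1 ≤ n) (data : List Int) :
    ∀ (xs : List Int) (out : List (Int × Int)) (time : List Int) (pool : List (Int × Int)),
      time.length = n.toNat →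
      pool.Pairwise (fun a b => ppLt a b = true) →
      pool.Perm (ppPairs time) →
      (xs.foldl (ppStepA n data) (out, time)).1 = (xs.foldl (ppStepB data) (out, pool)).1 := by
  intro xs
  induction xs with
  | nil => intro out time pool _ _ _; simp
  | cons x xs ih =>
    intro out time pool hlen hsorted hperm
    have hplen : pool.length = time.length := by
      rw [hperm.length_eq, ppPairs_length]
    rcases pool with _ | ⟨⟨t, i⟩, rest⟩
    · exfalso
      simp at hplen
      omega
    -- head of the pool is some (time[jk], jk)
    have hmem : (t, i) ∈ ppPairs time := hperm.subset (List.mem_cons_self)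
    obtain ⟨jk, hjk, hpq⟩ := mem_ppPairs hmem
    injection hpq with ht hi
    subst ht; subst hi
    -- it is the ppLt-minimum of ppPairs time
    have hmin_pool : ∀ p ∈ ppPairs time, p = (time[jk], (jk : Int)) ∨
        ppLt (time[jk], (jk : Int)) p = true := by
      intro p hp
      have hp' : p ∈ (time[jk], (jk : Int)) :: rest := hperm.symm.subset hp
      rcases List.mem_cons.mp hp' with rfl | hp''
      · exact Or.inl rfl
      · exact Or.inr ((List.pairwise_cons.mp hsorted).1 p hp'')
    -- A's scan result
    obtain ⟨r, hr, hr0, hrn, hrmin⟩ := ppArgmin_spec n time hn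
    have hrlen : r < (time.length : Int) := by omega
    have hgr : PySem.List.pyGetD time r 0 = time[r.toNat]'(by omega) :=
      PySem.List.pyGetD_eq_getElem time 0 hr0 hrlen
    have hgj : PySem.List.pyGetD time (jk : Int) 0 = time[jk] := by
      simp [PySem.List.pyGetD_natCast, List.getD_eq_getElem?_getD, List.getElem?_eq_getElem hjk]
    -- A's scan picks exactly the pool's head index
    have hri : r = (jk : Int) := by
      by_contra hne
      have hrnat : ((r.toNat : Nat) : Int) = r := by omega
      have hrmem : (time[r.toNat]'(by omega), r) ∈ ppPairs time := by
        have hget := ppPairs_getElem time r.toNat (by omega)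
        have : (ppPairs time)[r.toNat]'(by rw [ppPairs_length]; omega) ∈ ppPairs time :=
          List.getElem_mem _
        rw [hget, hrnat] at this
        exact this
      have hj := hrmin (jk : Int) (by omega) (by omega)
      rw [hgr, hgj] at hj
      rcases hmin_pool _ hrmem with heq | hlt
      · injection heq with h1 h2
        exact hne h2
      · simp only [ppLt, Bool.or_eq_true, decide_eq_true_eq, Bool.and_eq_true,
          beq_iff_eq] at hlt
        rcases hlt with hlt | ⟨heq, hlt⟩
        · omega
        · have := hj.2 (by omega)
          omega
    subst hri
    -- one step of each side
    have hstepA : ppStepA n data (out, time) x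
        = (out ++ [((jk : Int), time[jk])],
           time.set jk (time[jk] + PySem.List.pyGetD data x 0)) := by
      simp [ppStepA, hr, hgj]
    have hstepB : ppStepB data (out, (time[jk], (jk : Int)) :: rest) x
        = (out ++ [((jk : Int), time[jk])],
           rest.take (ppPos (time[jk] + PySem.List.pyGetD data x 0, (jk : Int)) rest)
             ++ (time[jk] + PySem.List.pyGetD data x 0, (jk : Int))
             :: rest.drop (ppPos (time[jk] + PySem.List.pyGetD data x 0, (jk : Int)) rest)) := by
      simp [ppStepB]
    simp only [List.foldl_cons, hstepA, hstepB]
    -- invariants for the new state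
    have hjP : jk < (ppPairs time).length := by rw [ppPairs_length]; omega
    have hPj : (ppPairs time)[jk]'hjP = (time[jk], (jk : Int)) := ppPairs_getElem time jk hjk
    have hPdecomp : ppPairs time
        = (ppPairs time).take jk ++ (time[jk], (jk : Int)) :: (ppPairs time).drop (jk + 1) := by
      rw [← hPj]
      conv_lhs => rw [← List.take_append_drop jk (ppPairs time)]
      rw [List.getElem_cons_drop]
    have hrest : rest.Perm ((ppPairs time).take jk ++ (ppPairs time).drop (jk + 1)) := by
      have h1 : ((time[jk], (jk : Int)) :: rest).Perm
          ((time[jk], (jk : Int)) :: ((ppPairs time).take jk ++ (ppPairs time).drop (jk + 1))) :=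
        (hperm.trans (hPdecomp ▸ List.Perm.refl _)).trans List.perm_middle
      exact h1.cons_inv
    have hrest_sorted : rest.Pairwise (fun a b => ppLt a b = true) :=
      (List.pairwise_cons.mp hsorted).2
    have hsnd : ∀ p ∈ rest, p.2 ≠ (jk : Int) := by
      have hnd : (((time[jk], (jk : Int)) :: rest).map (·.2)).Nodup := by
        refine ((hperm.map (·.2)).nodup_iff).mpr ?_
        rw [ppPairs_snd]
        exact PySem.List.nodup_pyRange_one _ _
      simp only [List.map_cons, List.nodup_cons] at hnd
      intro p hp hpe
      exact hnd.1 (List.mem_map.mpr ⟨p, hp, hpe⟩)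
    apply ih (out ++ [((jk : Int), time[jk])])
      (time.set jk (time[jk] + PySem.List.pyGetD data x 0)) _
    · simp [hlen]
    · -- sortedness of the re-inserted pool
      rw [List.pairwise_append]
      refine ⟨hrest_sorted.take, ?_, ?_⟩
      · rw [List.pairwise_cons]
        refine ⟨?_, hrest_sorted.drop⟩
        intro p hp
        have hf := ppPos_drop _ rest hrest_sorted p hp
        exact ppLt_total (hsnd p (List.mem_of_mem_drop hp)) hf
      · intro a ha b hb
        rcases List.mem_cons.mp hb with rfl | hb'
        · exact ppPos_take _ rest a ha
        · have h2 : (rest.take (ppPos (time[jk] + PySem.List.pyGetD data x 0, (jk : Int)) rest)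
              ++ rest.drop (ppPos (time[jk] + PySem.List.pyGetD data x 0, (jk : Int)) rest)).Pairwise
              (fun a b => ppLt a b = true) := by
            rw [List.take_append_drop]; exact hrest_sorted
          exact (List.pairwise_append.mp h2).2.2 a ha b hb'
    · -- the new pool is again the pair multiset of the new time array
      rw [ppPairs_set time jk hjk, List.set_eq_take_cons_drop _ hjP]
      refine (List.perm_middle.trans ?_).trans List.perm_middle.symm
      rw [List.take_append_drop]
      exact hrest.cons _

theorem parallel_processing_spec : Claim_equal_parallel_processing := by
  intro n m data hdom hpre
  unfold Spec_parallel_processing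
  by_cases hm : 0 < m
  · obtain ⟨hn, -⟩ := hpre hm
    unfold parallel_processing parallel_processing_alt
    have hinit : (PySem.List.pyRange 0 n 1).map (fun i => ((0 : Int), i))
        = ppPairs (List.replicate n.toNat (0 : Int)) := by
      apply List.ext_getElem
      · simp [ppPairs_length, PySem.List.length_pyRange_one]
      · intro k h1 h2
        have hk : k < n.toNat := by simpa [ppPairs_length] using h2
        rw [List.getElem_map, PySem.List.getElem_pyRange_one]
        rw [ppPairs_getElem _ _ (by simpa using hk)]
        simp
    apply pp_loop n hn data
    · simp
    · rw [List.pairwise_map]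
      refine (PySem.List.pairwise_lt_pyRange_one 0 n).imp ?_
      intro a b hab
      simp [ppLt, hab]
    · rw [hinit]
  · have hmr : PySem.List.pyRange 0 m 1 = [] := PySem.List.pyRange_one_eq_nil (by omega)
    unfold parallel_processing parallel_processing_alt
    rw [hmr]
    rfl
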